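-- pv_equiv track=rewrite | github.com/xingjianleng/DBGA | src/debruijn.py | duplicate_kmers
-- ===== SOURCE A (Python) =====
-- from collections import Counter
-- from typing import Any, Dict, List, Tuple, Set, Union
--
-- def duplicate_kmers(kmer_seqs: List[List[str]]) -> Set[str]:
--     """Get the duplicate kmers from each sequence
--
--     Parameters
--     ----------
--     kmer_seqs : List[List[str]]
--         list of list of kmers for each sequence
--
--     Returns
--     -------
--     Set[str]
--         the set containing duplicate kmers
--
--     """
--     assert len(kmer_seqs) == 2
--     duplicate_set = set()
--     for kmer_seq in kmer_seqs:
--         counter = Counter(kmer_seq)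
--         for key, value in counter.items():
--             if value > 1:
--                 duplicate_set.add(key)
--     return duplicate_set
-- ===== SOURCE B (Python) =====
-- def duplicate_kmers(kmer_seqs):
--     assert len(kmer_seqs) == 2
--     duplicate_set = set()
--     for kmer_seq in kmer_seqs:
--         rest = list(kmer_seq)
--         while rest:
--             k = rest.pop(0)
--             if k in rest:
--                 duplicate_set.add(k)
--     return duplicate_set
-- ===== Notes on version B (the rewrite author's own statement) =====
-- stated objective: alternative
-- what changed: Replaces the Counter table plus a second loop over its items with a lookahead scan: each sequence is consumed front-to-back and a kmer is added to the duplicate set when it still occurs in the remaining suffix, so no count table is built.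
import Mathlib
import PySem

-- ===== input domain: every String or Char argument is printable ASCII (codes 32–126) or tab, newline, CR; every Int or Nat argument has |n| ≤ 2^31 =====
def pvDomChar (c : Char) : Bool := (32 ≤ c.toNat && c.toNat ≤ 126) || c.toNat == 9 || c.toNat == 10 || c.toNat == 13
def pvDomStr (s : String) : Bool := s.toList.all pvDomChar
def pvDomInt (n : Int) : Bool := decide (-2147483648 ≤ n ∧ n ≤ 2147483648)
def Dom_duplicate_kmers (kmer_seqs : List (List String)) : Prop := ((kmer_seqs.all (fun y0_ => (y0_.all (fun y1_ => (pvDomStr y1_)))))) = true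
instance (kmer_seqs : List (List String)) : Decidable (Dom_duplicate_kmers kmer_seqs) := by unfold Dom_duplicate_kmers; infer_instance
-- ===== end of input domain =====

-- B replaces A's Counter-then-filter-items with a lookahead scan (add a kmer when it still
-- occurs in the remaining suffix); alternative decomposition, not claimed faster.

-- ===== PORT A =====
def duplicate_kmers (kmer_seqs : List (List String)) : List String :=
  kmer_seqs.foldl
    (fun duplicate_set kmer_seq =>
      (PySem.Dict.counter kmer_seq).items.foldl
        (fun d kv => if kv.2 > 1 then PySem.Set.add d kv.1 else d)
        duplicate_set)
    PySem.Set.empty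

-- ===== PORT B =====
-- the 'while rest: k = rest.pop(0); if k in rest: duplicate_set.add(k)' loop of Source B
def dupScan : List String → PySem.Set String → PySem.Set String
  | [], dup => dup
  | k :: rest, dup => dupScan rest (if rest.contains k then PySem.Set.add dup k else dup)

def duplicate_kmers_alt (kmer_seqs : List (List String)) : List String :=
  kmer_seqs.foldl (fun duplicate_set kmer_seq => dupScan kmer_seq duplicate_set) PySem.Set.empty

-- ===== PRECONDITION & SPEC =====
-- Pre_ excludes exactly the inputs on which A's 'assert len(kmer_seqs) == 2' raises AssertionError.
def Pre_duplicate_kmers (kmer_seqs : List (List String)) : Prop := kmer_seqs.length = 2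
instance (kmer_seqs : List (List String)) : Decidable (Pre_duplicate_kmers kmer_seqs) := by unfold Pre_duplicate_kmers; infer_instance
def pvWitness_duplicate_kmers : List (List String) := [["a", "b", "a"], ["c"]]
def Spec_duplicate_kmers (kmer_seqs : List (List String)) (out : List String) : Prop := out = duplicate_kmers_alt kmer_seqs
instance (kmer_seqs : List (List String)) (out : List String) : Decidable (Spec_duplicate_kmers kmer_seqs out) := by unfold Spec_duplicate_kmers; infer_instance

-- ===== CLAIM (what is proved, stated in full; the proofs are below) =====
def Claim_equal_duplicate_kmers : Prop := ∀ (kmer_seqs : List (List String)), Dom_duplicate_kmers kmer_seqs → Pre_duplicate_kmers kmer_seqs → Spec_duplicate_kmers kmer_seqs (duplicate_kmers kmer_seqs)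

-- ===== LEMMAS AND PROOFS =====

-- folding the add-if-count>1 step over a mapped (key, count) list = folding Set.add over the filtered key list
theorem foldl_addIf_map_eq (l : List String) (cnt : String → Nat) (dup : PySem.Set String) :
    (l.map (fun k => (k, (cnt k : Int)))).foldl
        (fun d kv => if kv.2 > 1 then PySem.Set.add d kv.1 else d) dup
    = (l.filter (fun k => cnt k > 1)).foldl PySem.Set.add dup := by
  induction l generalizing dup with
  | nil => rfl
  | cons x xs ih =>
    simp only [List.map_cons, List.foldl_cons, List.filter_cons]
    by_cases h : cnt x > 1
    · have h' : ((cnt x : Int) > 1) := by exact_mod_cast h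
      simp [h, h', ih]
    · have h' : ¬ ((cnt x : Int) > 1) := by exact_mod_cast h
      simp [h, h', ih]

-- adding a present element is a no-op
theorem add_eq_of_mem (s : PySem.Set String) (x : String) (h : x ∈ s) :
    PySem.Set.add s x = s := by
  unfold PySem.Set.add
  simp [h]

-- adding an absent element appends it
theorem add_eq_of_not_mem (s : PySem.Set String) (x : String) (h : x ∉ s) :
    PySem.Set.add s x = s ++ [x] := by
  unfold PySem.Set.add
  simp [h]

-- membership is preserved by Set.add
theorem mem_add_of_mem (s : PySem.Set String) (x k : String) (h : k ∈ s) :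
    k ∈ PySem.Set.add s x := by
  unfold PySem.Set.add
  split <;> simp [h]

-- the added element is a member
theorem mem_add_self (s : PySem.Set String) (x : String) : x ∈ PySem.Set.add s x := by
  unfold PySem.Set.add
  split
  · next h => simpa using h
  · simp

-- elements already present may be skipped when folding Set.add
theorem foldl_add_filter_ne (l : List String) (s : PySem.Set String) (k : String)
    (h : k ∈ s) :
    (l.filter (fun x => x ≠ k)).foldl PySem.Set.add s = l.foldl PySem.Set.add s := by
  induction l generalizing s with
  | nil => rfl
  | cons x xs ih =>
    rw [List.filter_cons]
    by_cases hx : x = k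
    · subst hx
      simp only [decide_eq_true_eq]
      rw [if_neg (by simp), List.foldl_cons, add_eq_of_mem s x h, ih s h]
    · rw [if_pos (by simpa using hx), List.foldl_cons, List.foldl_cons,
        ih (PySem.Set.add s x) (mem_add_of_mem s x k h)]

-- folding Set.add appends the new first occurrences
theorem foldl_add_eq_append (l : List String) (s : PySem.Set String) :
    l.foldl PySem.Set.add s
    = s ++ (PySem.Set.ofList l).filter (fun x => x ∉ s) := by
  induction l generalizing s with
  | nil => simp [PySem.Set.ofList]
  | cons x l ih =>
    have hx : PySem.Set.ofList (x :: l)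
        = [x] ++ (PySem.Set.ofList l).filter (fun y => y ∉ ([x] : List String)) := by
      show (x :: l).foldl PySem.Set.add [] = _
      rw [List.foldl_cons]
      have h0 : PySem.Set.add ([] : List String) x = [x] := rfl
      rw [h0, ih]
    rw [List.foldl_cons, ih, hx]
    rw [List.filter_append, List.filter_filter]
    by_cases hs : x ∈ s
    · rw [add_eq_of_mem s x hs]
      have h1 : List.filter (fun y => decide (y ∉ s)) [x] = [] := by simp [hs]
      have h2 : (PySem.Set.ofList l).filter (fun a => decide (a ∉ s) && decide (a ∉ ([x] : List String)))
          = (PySem.Set.ofList l).filter (fun a => a ∉ s) := by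
        apply List.filter_congr
        intro y _
        by_cases hyx : y = x
        · subst hyx; simp [hs]
        · simp [hyx]
      rw [h1, h2]
      simp
    · rw [add_eq_of_not_mem s x hs]
      have h1 : List.filter (fun y => decide (y ∉ s)) [x] = [x] := by simp [hs]
      have h2 : (PySem.Set.ofList l).filter (fun a => decide (a ∉ s) && decide (a ∉ ([x] : List String)))
          = (PySem.Set.ofList l).filter (fun a => a ∉ s ++ [x]) := by
        apply List.filter_congr
        intro y _
        by_cases hyx : y = x
        · subst hyx; simp
        · simp [hyx]
      rw [h1, h2]
      simp
-- first-occurrence structure of set(x :: l)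
theorem ofList_cons (x : String) (l : List String) :
    PySem.Set.ofList (x :: l)
    = x :: (PySem.Set.ofList l).filter (fun y => y ≠ x) := by
  show (x :: l).foldl PySem.Set.add [] = _
  rw [List.foldl_cons]
  have h0 : PySem.Set.add ([] : List String) x = [x] := rfl
  rw [h0, foldl_add_eq_append]
  simp

-- B's scan = fold Set.add over the duplicated first occurrences (A's order)
theorem dupScan_eq (seq : List String) (dup : PySem.Set String) :
    dupScan seq dup
    = ((PySem.Set.ofList seq).filter (fun k => seq.count k > 1)).foldl PySem.Set.add dup := by
  induction seq generalizing dup with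
  | nil => rfl
  | cons k rest ih =>
    rw [ofList_cons, List.filter_cons]
    have hfilter :
        ((PySem.Set.ofList rest).filter (fun y => y ≠ k)).filter (fun x => (k :: rest).count x > 1)
        = ((PySem.Set.ofList rest).filter (fun x => rest.count x > 1)).filter (fun y => y ≠ k) := by
      rw [List.filter_filter, List.filter_filter]
      apply List.filter_congr
      intro y _
      by_cases hyk : y = k
      · simp [hyk]
      · have hky : ¬ k = y := fun h => hyk (Eq.symm h)
        have hc : (k :: rest).count y = rest.count y := by
          simp [hky]
        simp [hyk, hc]
    by_cases hk : k ∈ rest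
    · have hmem : rest.contains k = true := by simpa using hk
      have hgt : (k :: rest).count k > 1 := by
        have h1 : rest.count k >= 1 := List.one_le_count_iff.mpr hk
        simp
        omega
      rw [if_pos (by simpa using hgt)]
      simp only [dupScan, hmem, if_true]
      rw [ih, hfilter, List.foldl_cons]
      exact (foldl_add_filter_ne _ _ k (mem_add_self dup k)).symm ▸ rfl
    · have hmem : rest.contains k = false := by simpa using hk
      have hngt : ¬ (k :: rest).count k > 1 := by
        have h0 : rest.count k = 0 := List.count_eq_zero.mpr hk
        simp
        omega
      rw [if_neg (by simpa using hngt)]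
      simp only [dupScan, hmem, Bool.false_eq_true, if_false]
      rw [ih, hfilter]
      have hall : ((PySem.Set.ofList rest).filter (fun x => rest.count x > 1)).filter (fun y => y ≠ k)
          = (PySem.Set.ofList rest).filter (fun x => rest.count x > 1) := by
        apply List.filter_eq_self.mpr
        intro y hy
        have hy1 : y ∈ PySem.Set.ofList rest := List.mem_of_mem_filter hy
        have hy2 : y ∈ rest := (PySem.Set.mem_ofList _ _).mp hy1
        have hy3 : y ≠ k := fun h => hk (h ▸ hy2)
        simpa using hy3
      rw [hall]

-- per-sequence step of A = per-sequence step of B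
theorem step_eq (kmer_seq : List String) (dup : PySem.Set String) :
    (PySem.Dict.counter kmer_seq).items.foldl
        (fun d kv => if kv.2 > 1 then PySem.Set.add d kv.1 else d) dup
    = dupScan kmer_seq dup := by
  rw [PySem.Dict.items_counter, foldl_addIf_map_eq, dupScan_eq]

-- ===== VERDICT (by name: the statement is the Claim_ definition above) =====
theorem duplicate_kmers_spec : Claim_equal_duplicate_kmers := by
  intro kmer_seqs _ _
  unfold Spec_duplicate_kmers duplicate_kmers duplicate_kmers_alt
  have h : (fun (d : PySem.Set String) (kmer_seq : List String) =>
      (PySem.Dict.counter kmer_seq).items.foldl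
        (fun d kv => if kv.2 > 1 then PySem.Set.add d kv.1 else d) d)
    = (fun (d : PySem.Set String) (kmer_seq : List String) => dupScan kmer_seq d) :=
    funext fun d => funext fun seq => step_eq seq d
  rw [h]
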